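-- pv_equiv track=rewrite | github.com/abiusch/penny_assistant | src/judgment/judgment_engine.py | _has_specific_noun
-- ===== SOURCE A (Python) =====
-- def _has_specific_noun(text: str) -> bool:
--     """
--     Check if text contains specific nouns (file names, clear references).
--
--     Indicators of specific nouns:
--     - Contains file extensions (.py, .js, .md)
--     - Contains underscores or hyphens (variable_name, file-name)
--     - Contains technical terms
--
--     Args:
--         text: Text to check
--
--     Returns:
--         True if specific noun found
--     """
--     # File extensions
--     extensions = ['.py', '.js', '.ts', '.md', '.txt', '.json', '.yaml', '.sql']
--     if any(ext in text for ext in extensions):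
--         return True
--
--     # Snake_case or kebab-case identifiers
--     if '_' in text or '-' in text:
--         # Make sure it's not just a hyphen in regular text
--         words = text.split()
--         if any('_' in word or (word.count('-') >= 2) for word in words):
--             return True
--
--     # Technical/specific terms (longer words)
--     words = text.split()
--     long_words = [w for w in words if len(w) > 8]
--     if long_words:
--         return True
--
--     return False
-- ===== SOURCE B (Python) =====
-- def _has_specific_noun(text: str) -> bool:
--     extensions = ['.py', '.js', '.ts', '.md', '.txt', '.json', '.yaml', '.sql']
--     return any(
--         any(ext in word for ext in extensions)
--         or '_' in word
--         or word.count('-') >= 2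
--         or len(word) > 8
--         for word in text.split()
--     )
-- ===== Notes on version B (the rewrite author's own statement) =====
-- stated objective: simpler
-- what changed: A's three separate scans (whole-text extension substring scan, a guarded split-and-check for underscores/double hyphens, and a second split for long words) are fused into one any() pass over the word list with a single per-word predicate; the underscore-or-hyphen pre-guard is dropped as redundant.
import Mathlib
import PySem

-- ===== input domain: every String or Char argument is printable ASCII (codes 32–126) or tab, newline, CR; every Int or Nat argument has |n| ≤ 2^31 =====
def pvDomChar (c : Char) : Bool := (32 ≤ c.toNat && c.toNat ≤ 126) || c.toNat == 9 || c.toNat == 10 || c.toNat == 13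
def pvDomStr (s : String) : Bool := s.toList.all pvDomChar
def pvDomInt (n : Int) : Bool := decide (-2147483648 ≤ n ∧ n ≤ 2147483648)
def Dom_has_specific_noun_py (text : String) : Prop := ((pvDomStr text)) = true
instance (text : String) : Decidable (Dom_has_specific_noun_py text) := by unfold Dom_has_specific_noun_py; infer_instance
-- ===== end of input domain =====

-- B fuses A's three separate scans (whole-text extension scan, guarded hyphen/underscore pass, long-word pass) into one pass over the word list (objective: simpler).

-- ===== PORT A =====
-- shared literal data: the extension list from the Python source
def pvExtensions : List String := [".py", ".js", ".ts", ".md", ".txt", ".json", ".yaml", ".sql"]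

-- the trailing long-word check of A ('long_words = [...]; if long_words: return True; return False'),
-- reached by fall-through from two places in the Python
def pvLongCheck (text : String) : Bool :=
  let words := PySem.Str.split₀ text
  let long_words := words.filter (fun w => decide (8 < PySem.Str.len w))
  if long_words.isEmpty then false else true

def has_specific_noun_py (text : String) : Bool :=
  if pvExtensions.any (fun ext => PySem.Str.isIn ext text) then true
  else if PySem.Str.isIn "_" text || PySem.Str.isIn "-" text then
    let words := PySem.Str.split₀ text
    if words.any (fun word => PySem.Str.isIn "_" word || decide (2 ≤ PySem.Str.count word "-")) then
      true
    else
      pvLongCheck text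
  else
    pvLongCheck text

-- ===== PORT B =====
def has_specific_noun_py_alt (text : String) : Bool :=
  (PySem.Str.split₀ text).any (fun word =>
    pvExtensions.any (fun ext => PySem.Str.isIn ext word)
    || PySem.Str.isIn "_" word
    || decide (2 ≤ PySem.Str.count word "-")
    || decide (8 < PySem.Str.len word))

-- ===== PRECONDITION & SPEC =====
def Spec_has_specific_noun_py (text : String) (out : Bool) : Prop := out = has_specific_noun_py_alt text
instance (text : String) (out : Bool) : Decidable (Spec_has_specific_noun_py text out) := by unfold Spec_has_specific_noun_py; infer_instance

-- ===== CLAIM (what is proved, stated in full; the proofs are below) =====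
def Claim_equal_has_specific_noun_py : Prop := ∀ (text : String), Dom_has_specific_noun_py text → Spec_has_specific_noun_py text (has_specific_noun_py text)

-- ===== LEMMAS AND PROOFS =====

-- a prefix of xs ++ c :: ys avoiding c is a prefix of xs
theorem pvPrefixSplit (sub : List Char) (c : Char) : ∀ (xs ys : List Char),
    c ∉ sub → sub <+: xs ++ c :: ys → sub <+: xs := by
  induction sub with
  | nil => intro xs ys _ _; exact List.nil_prefix
  | cons a t ih =>
    intro xs ys hc hp
    cases xs with
    | nil =>
      simp only [List.nil_append, List.cons_prefix_cons] at hp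
      exact absurd (hp.1 ▸ List.mem_cons_self) hc
    | cons x xs' =>
      simp only [List.cons_append, List.cons_prefix_cons] at hp ⊢
      exact ⟨hp.1, ih xs' ys (fun h => hc (List.mem_cons_of_mem _ h)) hp.2⟩

-- an infix of xs ++ c :: ys avoiding c lies in xs or in ys
theorem pvInfixSplit (sub : List Char) (c : Char) (ys : List Char) : ∀ (xs : List Char),
    c ∉ sub → sub <:+: xs ++ c :: ys → sub <:+: xs ∨ sub <:+: ys := by
  intro xs
  induction xs with
  | nil =>
    intro hc h
    rw [List.nil_append, List.infix_cons_iff] at h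
    rcases h with h | h
    · cases sub with
      | nil => exact Or.inl List.nil_infix
      | cons a t =>
        simp only [List.cons_prefix_cons] at h
        exact absurd (h.1 ▸ List.mem_cons_self) hc
    · exact Or.inr h
  | cons x xs' ih =>
    intro hc h
    rw [List.cons_append, List.infix_cons_iff] at h
    rcases h with h | h
    · exact Or.inl (pvPrefixSplit sub c (x :: xs') ys hc h).isInfix
    · rcases ih hc h with h' | h'
      · exact Or.inl (h'.trans (List.suffix_cons x xs').isInfix)
      · exact Or.inr h'

-- the accumulator of split₀.go is prepended, reversed
theorem pvSplitGoAcc : ∀ (s cur : List Char) (acc : List (List Char)),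
    PySem.Chars.split₀.go s cur acc = acc.reverse ++ PySem.Chars.split₀.go s cur [] := by
  intro s
  induction s with
  | nil =>
    intro cur acc
    simp only [PySem.Chars.split₀.go]
    by_cases h : cur.isEmpty
    · simp [h]
    · simp [h]
  | cons c rest ih =>
    intro cur acc
    simp only [PySem.Chars.split₀.go]
    by_cases hs : PySem.Chars.isspace c
    · by_cases hc : cur.isEmpty
      · simp only [hs, hc, if_true]
        exact ih [] acc
      · simp only [hs, hc, if_true, Bool.false_eq_true, if_false]
        rw [ih [] (cur.reverse :: acc), ih [] [cur.reverse]]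
        simp
    · simp only [hs, Bool.false_eq_true, if_false]
      exact ih (c :: cur) acc

-- every word produced by split₀.go is an infix of cur.reverse ++ s
theorem pvWordInfix : ∀ (s cur : List Char) (w : List Char),
    w ∈ PySem.Chars.split₀.go s cur [] → w <:+: cur.reverse ++ s := by
  intro s
  induction s with
  | nil =>
    intro cur w hw
    simp only [PySem.Chars.split₀.go] at hw
    by_cases h : cur.isEmpty
    · simp [h] at hw
    · simp [h] at hw
      subst hw; simp
  | cons c rest ih =>
    intro cur w hw
    simp only [PySem.Chars.split₀.go] at hw
    by_cases hs : PySem.Chars.isspace c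
    · have hsub : (c :: rest) <:+: cur.reverse ++ c :: rest := List.infix_append_right
      have hrest : rest <:+: cur.reverse ++ c :: rest :=
        ((List.suffix_cons c rest).isInfix).trans hsub
      by_cases hc : cur.isEmpty
      · simp only [hs, hc, if_true] at hw
        exact ((by simpa using ih [] w hw : w <:+: rest)).trans hrest
      · simp only [hs, hc, if_true, Bool.false_eq_true, if_false] at hw
        rw [pvSplitGoAcc] at hw
        simp only [List.reverse_cons, List.reverse_nil, List.nil_append, List.mem_append,
          List.mem_singleton] at hw
        rcases hw with hw | hw
        · subst hw; exact List.infix_append_left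
        · exact ((by simpa using ih [] w hw : w <:+: rest)).trans hrest
    · simp only [hs, Bool.false_eq_true, if_false] at hw
      have := ih (c :: cur) w hw
      simpa using this

-- if a nonempty all-nonspace pattern is an infix of cur.reverse ++ s, some produced word contains it
theorem pvExistsWord (sub : List Char) (hne : sub ≠ []) (hns : ∀ c ∈ sub, PySem.Chars.isspace c = false) :
    ∀ (s cur : List Char), sub <:+: cur.reverse ++ s →
      ∃ w ∈ PySem.Chars.split₀.go s cur [], sub <:+: w := by
  intro s
  induction s with
  | nil =>
    intro cur h
    rw [List.append_nil] at h
    have hcur : cur.isEmpty = false := by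
      cases cur with
      | nil => simp at h; exact absurd h hne
      | cons a t => rfl
    refine ⟨cur.reverse, ?_, h⟩
    simp [PySem.Chars.split₀.go, hcur]
  | cons c rest ih =>
    intro cur h
    simp only [PySem.Chars.split₀.go]
    by_cases hs : PySem.Chars.isspace c
    · have hcn : c ∉ sub := fun hm => by simp [hns c hm] at hs
      rcases pvInfixSplit sub c rest cur.reverse hcn h with h' | h'
      · have hcur : cur.isEmpty = false := by
          cases cur with
          | nil => simp at h'; exact absurd h' hne
          | cons a t => rfl
        simp only [hs, hcur, if_true, Bool.false_eq_true, if_false]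
        rw [pvSplitGoAcc]
        exact ⟨cur.reverse, by simp, h'⟩
      · rcases ih [] (by simpa using h') with ⟨w, hw, hsw⟩
        by_cases hc : cur.isEmpty
        · simp only [hs, hc, if_true]
          exact ⟨w, hw, hsw⟩
        · simp only [hs, hc, if_true, Bool.false_eq_true, if_false]
          rw [pvSplitGoAcc]
          exact ⟨w, by simp [hw], hsw⟩
    · simp only [hs, Bool.false_eq_true, if_false]
      exact ih (c :: cur) (by simpa using h)

-- the whole-text scan equals the word-wise scan, for nonempty all-nonspace patterns
theorem pvIsInSplit (sub s : List Char) (hne : sub ≠ []) (hns : ∀ c ∈ sub, PySem.Chars.isspace c = false) :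
    (PySem.Chars.isIn sub s = true ↔ ∃ w ∈ PySem.Chars.split₀ s, PySem.Chars.isIn sub w = true) := by
  simp only [PySem.Chars.isIn_iff_infix, PySem.Chars.split₀]
  constructor
  · intro h
    exact pvExistsWord sub hne hns s [] (by simpa using h)
  · rintro ⟨w, hw, hsw⟩
    exact hsw.trans (by simpa using pvWordInfix s [] w hw)

-- a character count is 0 when the character does not occur
theorem pvCountGoNotMem (c : Char) : ∀ (fuel : Nat) (l : List Char) (acc : Nat),
    c ∉ l → PySem.Chars.count.go [c] fuel l acc = acc := by
  intro fuel
  induction fuel with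
  | zero => intro l acc _; simp [PySem.Chars.count.go]
  | succ n ih =>
    intro l acc hc
    cases l with
    | nil => simp [PySem.Chars.count.go]
    | cons h t =>
      have hpre : [c].isPrefixOf (h :: t) = false := by
        simp only [List.isPrefixOf, Bool.and_eq_false_iff]
        left
        exact beq_eq_false_iff_ne.mpr (fun he => hc (he ▸ List.mem_cons_self))
      simp only [PySem.Chars.count.go, hpre, Bool.false_eq_true, if_false]
      exact ih t acc (fun hm => hc (List.mem_cons_of_mem _ hm))

theorem pvCountNotMem (c : Char) (l : List Char) (hc : c ∉ l) : PySem.Chars.count l [c] = 0 := by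
  simp only [PySem.Chars.count, List.isEmpty_cons, Bool.false_eq_true, if_false]
  exact pvCountGoNotMem c l.length l 0 hc

-- a single-character pattern occurs iff the character is a member
theorem pvIsInSingleton (c : Char) (s : List Char) : (PySem.Chars.isIn [c] s = true ↔ c ∈ s) := by
  rw [PySem.Chars.isIn_iff_infix]
  constructor
  · intro h; exact h.subset List.mem_cons_self
  · intro h
    rcases List.append_of_mem h with ⟨p, t, rfl⟩
    exact ⟨p, t, by simp⟩

-- each extension literal is nonempty and whitespace-free
set_option maxRecDepth 8192 in
theorem pvExtOk : ∀ ext ∈ pvExtensions, ext.toList ≠ [] ∧ ∀ c ∈ ext.toList, PySem.Chars.isspace c = false := by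
  intro ext hm
  fin_cases hm <;> refine ⟨by simp, ?_⟩ <;> (intro c hc; simp at hc) <;>
    (first | (rcases hc with rfl|rfl|rfl) | (rcases hc with rfl|rfl|rfl|rfl) | (rcases hc with rfl|rfl|rfl|rfl|rfl)) <;> decide

-- membership in the string-level word list
theorem pvMemSplit (text word : String) :
    word ∈ PySem.Str.split₀ text ↔ ∃ w ∈ PySem.Chars.split₀ text.toList, word = String.ofList w := by
  simp only [PySem.Str.split₀, List.mem_map]
  constructor
  · rintro ⟨w, hw, rfl⟩; exact ⟨w, hw, rfl⟩
  · rintro ⟨w, hw, rfl⟩; exact ⟨w, hw, rfl⟩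

-- the whole-text extension scan equals the word-wise extension scan
theorem pvExtText (text : String) :
    (pvExtensions.any (fun ext => PySem.Str.isIn ext text)) =
    ((PySem.Str.split₀ text).any (fun word => pvExtensions.any (fun ext => PySem.Str.isIn ext word))) := by
  rw [Bool.eq_iff_iff]
  simp only [List.any_eq_true]
  constructor
  · rintro ⟨ext, hm, hin⟩
    rcases (pvIsInSplit ext.toList text.toList (pvExtOk ext hm).1 (pvExtOk ext hm).2).mp
        (by simpa using hin) with ⟨w, hw, hsw⟩
    refine ⟨String.ofList w, (pvMemSplit text _).mpr ⟨w, hw, rfl⟩, ext, hm, ?_⟩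
    simpa [PySem.Str.isIn_eq, String.toList_ofList] using hsw
  · rintro ⟨word, hwm, ext, hm, hin⟩
    rcases (pvMemSplit text word).mp hwm with ⟨w, hw, rfl⟩
    refine ⟨ext, hm, ?_⟩
    rw [PySem.Str.isIn_eq]
    exact (pvIsInSplit ext.toList text.toList (pvExtOk ext hm).1 (pvExtOk ext hm).2).mpr
      ⟨w, hw, by simpa [PySem.Str.isIn_eq, String.toList_ofList] using hin⟩

-- a word that carries an underscore or two hyphens puts the corresponding character in the text
theorem pvGuard (text word : String) (hm : word ∈ PySem.Str.split₀ text)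
    (h : (PySem.Str.isIn "_" word || decide (2 ≤ PySem.Str.count word "-")) = true) :
    (PySem.Str.isIn "_" text || PySem.Str.isIn "-" text) = true := by
  rcases (pvMemSplit text word).mp hm with ⟨w, hw, rfl⟩
  have hinf : w <:+: text.toList := by
    simpa using pvWordInfix text.toList [] w (by simpa [PySem.Chars.split₀] using hw)
  rcases Bool.or_eq_true_iff.mp h with h | h
  · apply Bool.or_eq_true_iff.mpr; left
    rw [PySem.Str.isIn_eq] at h ⊢
    have : '_' ∈ w := (pvIsInSingleton '_' _).mp (by simpa [String.toList_ofList] using h)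
    exact (pvIsInSingleton '_' _).mpr (hinf.subset this)
  · apply Bool.or_eq_true_iff.mpr; right
    have h2 : 2 ≤ PySem.Chars.count w ['-'] := by
      simpa [PySem.Str.count_eq, String.toList_ofList] using of_decide_eq_true h
    have hmem : '-' ∈ w := by
      by_contra hc
      rw [pvCountNotMem '-' w hc] at h2
      omega
    rw [PySem.Str.isIn_eq]
    exact (pvIsInSingleton '-' _).mpr (hinf.subset hmem)

-- A's trailing long-word check as a word-wise any
theorem pvLongCheckAny (text : String) :
    pvLongCheck text = (PySem.Str.split₀ text).any (fun w => decide (8 < PySem.Str.len w)) := by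
  rw [pvLongCheck]
  by_cases hh : ((PySem.Str.split₀ text).filter (fun w => decide (8 < PySem.Str.len w))).isEmpty = true
  · rw [if_pos hh]
    rw [List.isEmpty_iff, List.filter_eq_nil_iff] at hh
    symm
    rw [List.any_eq_false]
    intro w hw
    simpa using hh w hw
  · rw [if_neg hh]
    symm
    rw [List.any_eq_true]
    have hf : ((PySem.Str.split₀ text).filter (fun w => decide (8 < PySem.Str.len w))).isEmpty = false :=
      Bool.eq_false_iff.mpr hh
    rcases List.isEmpty_eq_false_iff_exists_mem.mp hf with ⟨w, hw⟩
    rw [List.mem_filter] at hw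
    exact ⟨w, hw.1, hw.2⟩

theorem pvMain (text : String) : has_specific_noun_py text = has_specific_noun_py_alt text := by
  rw [has_specific_noun_py, has_specific_noun_py_alt]
  by_cases hE : pvExtensions.any (fun ext => PySem.Str.isIn ext text) = true
  · rw [if_pos hE]
    rw [pvExtText] at hE
    rw [List.any_eq_true] at hE
    rcases hE with ⟨word, hm, hx⟩
    exact (List.any_eq_true.mpr ⟨word, hm, by simp only [hx, Bool.true_or]⟩).symm
  · rw [if_neg hE]
    by_cases hW : (PySem.Str.split₀ text).any
        (fun word => PySem.Str.isIn "_" word || decide (2 ≤ PySem.Str.count word "-")) = true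
    · rcases List.any_eq_true.mp hW with ⟨word, hm, hx⟩
      rw [if_pos (pvGuard text word hm hx), if_pos hW]
      exact (List.any_eq_true.mpr ⟨word, hm, by rcases Bool.or_eq_true_iff.mp hx with h | h <;> simp only [h, Bool.or_true, Bool.true_or]⟩).symm
    · -- neither an extension word nor an underscore/double-hyphen word exists:
      -- both sides reduce to the long-word check
      have hB : (PySem.Str.split₀ text).any (fun word =>
          pvExtensions.any (fun ext => PySem.Str.isIn ext word)
          || PySem.Str.isIn "_" word
          || decide (2 ≤ PySem.Str.count word "-")
          || decide (8 < PySem.Str.len word)) =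
          (PySem.Str.split₀ text).any (fun w => decide (8 < PySem.Str.len w)) := by
        rw [pvExtText] at hE
        rw [Bool.eq_iff_iff, List.any_eq_true, List.any_eq_true]
        constructor
        · rintro ⟨word, hm, hx⟩
          refine ⟨word, hm, ?_⟩
          have h1 : pvExtensions.any (fun ext => PySem.Str.isIn ext word) = false := by
            cases hv : pvExtensions.any (fun ext => PySem.Str.isIn ext word)
            · rfl
            · exact absurd (List.any_eq_true.mpr ⟨word, hm, hv⟩) hE
          have h2 : (PySem.Str.isIn "_" word || decide (2 ≤ PySem.Str.count word "-")) = false := by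
            cases hv : (PySem.Str.isIn "_" word || decide (2 ≤ PySem.Str.count word "-"))
            · rfl
            · exact absurd (List.any_eq_true.mpr ⟨word, hm, hv⟩) hW
          rw [Bool.or_eq_false_iff] at h2
          simp only [h1, h2.1, h2.2, Bool.false_or] at hx
          exact hx
        · rintro ⟨word, hm, hx⟩
          exact ⟨word, hm, by simp only [hx, Bool.or_true]⟩
      by_cases hG : (PySem.Str.isIn "_" text || PySem.Str.isIn "-" text) = true
      · rw [if_pos hG, if_neg hW, pvLongCheckAny, hB]
      · rw [if_neg hG, pvLongCheckAny, hB]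

-- ===== VERDICT (by name: the statement is the Claim_ definition above) =====
theorem has_specific_noun_py_spec : Claim_equal_has_specific_noun_py := by
  intro text _
  exact (pvMain text).symm ▸ rfl
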